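-- pv_equiv track=rewrite | github.com/xlateai/xos | src/core/apps/study/study.py | _sentence_with_lime_vocab
-- ===== SOURCE A (Python) =====
-- def _sentence_with_lime_vocab(s, vword):
--     """Minecraft markup: lime (``&a``) vocab hits; intervening prose bold white."""
--     if not vword:
--         return f"&f&l{s}&r"
--     s = str(s)
--     parts = s.split(str(vword))
--     if len(parts) == 1:
--         return f"&f&l{s}&r"
--     chunks = []
--     for i, p in enumerate(parts):
--         if p:
--             chunks.append(f"&f&l{p}&r")
--         if i < len(parts) - 1:
--             chunks.append(f"&a&l{vword}&r")
--     return "".join(chunks)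
-- ===== SOURCE B (Python) =====
-- def _sentence_with_lime_vocab(s, vword):
--     """Minecraft markup: lime (``&a``) vocab hits; intervening prose bold white."""
--     if not vword:
--         return f"&f&l{s}&r"
--     s = str(s)
--     v = str(vword)
--     chunks = []
--     rest = s
--     while True:
--         idx = rest.find(v)
--         if idx == -1:
--             break
--         if idx:
--             chunks.append(f"&f&l{rest[:idx]}&r")
--         chunks.append(f"&a&l{vword}&r")
--         rest = rest[idx + len(v):]
--     if not chunks:
--         return f"&f&l{s}&r"
--     if rest:
--         chunks.append(f"&f&l{rest}&r")
--     return "".join(chunks)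
-- ===== Notes on version B (the rewrite author's own statement) =====
-- stated objective: alternative
-- what changed: Replaced split-into-parts + enumerate/join with a single cursor scan that repeatedly finds the next occurrence, emitting prose and lime chunks as it goes, so no parts list or index bookkeeping is built.
import Mathlib
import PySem

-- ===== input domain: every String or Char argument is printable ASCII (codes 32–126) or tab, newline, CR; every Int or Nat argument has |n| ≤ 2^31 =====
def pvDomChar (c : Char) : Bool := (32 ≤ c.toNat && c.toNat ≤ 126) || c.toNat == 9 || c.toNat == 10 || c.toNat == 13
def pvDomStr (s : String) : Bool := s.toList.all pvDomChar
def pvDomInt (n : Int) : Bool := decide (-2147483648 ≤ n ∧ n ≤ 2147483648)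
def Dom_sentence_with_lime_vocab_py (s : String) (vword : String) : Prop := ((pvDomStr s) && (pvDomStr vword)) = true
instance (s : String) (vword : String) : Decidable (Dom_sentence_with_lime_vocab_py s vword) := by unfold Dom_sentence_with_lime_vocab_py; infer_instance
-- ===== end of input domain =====

-- B replaces split+enumerate+join with a single cursor scan using find; return values proved equal.

-- ===== PORT A =====
-- f"&f&l{p}&r"
def pvWrapA (p : List Char) : List Char := ['&', 'f', '&', 'l'] ++ p ++ ['&', 'r']
-- f"&a&l{vword}&r"
def pvLimeA (v : List Char) : List Char := ['&', 'a', '&', 'l'] ++ v ++ ['&', 'r']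

def sentence_with_lime_vocab_py (s : String) (vword : String) : String :=
  if vword.toList = [] then String.ofList (pvWrapA s.toList)
  else
    let cs := s.toList
    let parts := PySem.Chars.splitOn cs vword.toList
    if parts.length = 1 then String.ofList (pvWrapA cs)
    else
      let chunks := (PySem.List.enumerate parts 0).foldl
        (fun acc ip =>
          let acc := if ip.2 ≠ [] then acc ++ [pvWrapA ip.2] else acc
          if ip.1 < (parts.length : Int) - 1 then acc ++ [pvLimeA vword.toList] else acc) []
      String.ofList (PySem.Chars.join [] chunks)

-- ===== PORT B =====  (Source B emits the same f-string chunks, so it reuses the two chunk helpers)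

-- the while loop of Source B: cursor scan over the remaining suffix; returns (chunks, rest)
def pvBgo (c : Char) (v' : List Char) (rest : List Char) (chunks : List (List Char)) :
    List (List Char) × List Char :=
  let idx := PySem.Chars.find rest (c :: v')
  if h : idx = -1 then (chunks, rest)
  else
    let i := idx.toNat
    let chunks1 := if i ≠ 0 then chunks ++ [pvWrapA (rest.take i)] else chunks
    pvBgo c v' (rest.drop (i + (c :: v').length)) (chunks1 ++ [pvLimeA (c :: v')])
termination_by rest.length
decreasing_by
  have hinf : (c :: v') <:+: rest := (PySem.Chars.find_ne_neg_one_iff rest (c :: v')).1 h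
  have := hinf.length_le
  simp at this ⊢
  omega

def sentence_with_lime_vocab_py_alt (s : String) (vword : String) : String :=
  match vword.toList with
  | [] => String.ofList (pvWrapA s.toList)
  | c :: v' =>
    let r := pvBgo c v' s.toList []
    if r.1 = [] then String.ofList (pvWrapA s.toList)
    else String.ofList (PySem.Chars.join []
      (if r.2 ≠ [] then r.1 ++ [pvWrapA r.2] else r.1))

-- ===== PRECONDITION & SPEC =====
def Spec_sentence_with_lime_vocab_py (s : String) (vword : String) (out : String) : Prop := out = sentence_with_lime_vocab_py_alt s vword
instance (s : String) (vword : String) (out : String) : Decidable (Spec_sentence_with_lime_vocab_py s vword out) := by unfold Spec_sentence_with_lime_vocab_py; infer_instance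

-- ===== CLAIM (what is proved, stated in full; the proofs are below) =====
def Claim_equal_sentence_with_lime_vocab_py : Prop := ∀ (s : String) (vword : String), Dom_sentence_with_lime_vocab_py s vword → Spec_sentence_with_lime_vocab_py s vword (sentence_with_lime_vocab_py s vword)

-- ===== LEMMAS AND PROOFS =====

-- first-occurrence split, the common normal form of A's splitOn and B's cursor loop
def pvSplitF (c : Char) (v' : List Char) (cs : List Char) : List (List Char) :=
  let idx := PySem.Chars.find cs (c :: v')
  if h : idx = -1 then [cs]
  else cs.take idx.toNat :: pvSplitF c v' (cs.drop (idx.toNat + (c :: v').length))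
termination_by cs.length
decreasing_by
  have hinf : (c :: v') <:+: cs := (PySem.Chars.find_ne_neg_one_iff cs (c :: v')).1 h
  have := hinf.length_le
  simp at this ⊢
  omega

def pvConsHead (pre : List Char) : List (List Char) → List (List Char)
  | [] => [pre]
  | p :: r => (pre ++ p) :: r

def pvChunkR (v : List Char) : List (List Char) → List (List Char)
  | [] => []
  | [p] => if p ≠ [] then [pvWrapA p] else []
  | p :: q :: r => (if p ≠ [] then [pvWrapA p] else []) ++ [pvLimeA v] ++ pvChunkR v (q :: r)

def pvPreR (v : List Char) : List (List Char) → List (List Char)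
  | [] => []
  | [_] => []
  | p :: q :: r => (if p ≠ [] then [pvWrapA p] else []) ++ [pvLimeA v] ++ pvPreR v (q :: r)

def pvLastR : List (List Char) → List Char
  | [] => []
  | [p] => p
  | _ :: q :: r => pvLastR (q :: r)

theorem pv_find_def (t sub : List Char) : PySem.Chars.find t sub = PySem.Chars.find.go sub t 0 := rfl

theorem pv_findgo_eq (sub t : List Char) (k : Nat) :
    PySem.Chars.find.go sub t k =
      if PySem.Chars.find t sub = -1 then -1 else (k : Int) + PySem.Chars.find t sub := by
  induction t generalizing k with
  | nil =>
    rw [pv_find_def, PySem.Chars.find.go.eq_1, PySem.Chars.find.go.eq_1]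
    by_cases h : sub.isEmpty = true <;> simp [h]
  | cons x t ih =>
    rw [pv_find_def, PySem.Chars.find.go.eq_2, PySem.Chars.find.go.eq_2]
    by_cases h : sub.isPrefixOf (x :: t) = true
    · simp [h]
    · simp only [h, if_false]
      rw [ih, ih]
      have := PySem.Chars.neg_one_le_find t sub
      split <;> [simp; skip]
      split <;> omega

theorem pv_find_nil (sub : List Char) (h : sub ≠ []) : PySem.Chars.find [] sub = -1 := by
  rw [pv_find_def, PySem.Chars.find.go.eq_1]
  simp [List.isEmpty_iff, h]

theorem pv_find_cons_pos (sub : List Char) (x : Char) (t : List Char)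
    (h : sub.isPrefixOf (x :: t) = true) : PySem.Chars.find (x :: t) sub = 0 := by
  rw [pv_find_def, PySem.Chars.find.go.eq_2]
  simp [h]

theorem pv_find_cons_neg (sub : List Char) (x : Char) (t : List Char)
    (h : ¬ sub.isPrefixOf (x :: t) = true) :
    PySem.Chars.find (x :: t) sub =
      if PySem.Chars.find t sub = -1 then -1 else 1 + PySem.Chars.find t sub := by
  rw [pv_find_def, PySem.Chars.find.go.eq_2]
  simp only [h, if_false]
  rw [pv_findgo_eq]
  norm_num

theorem pv_go_succ_nil (sep cur : List Char) (acc : List (List Char)) (fuel : Nat) :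
    PySem.Chars.splitOn.go sep (fuel+1) [] cur acc = (cur.reverse :: acc).reverse := rfl

theorem pv_go_succ_cons (sep cur : List Char) (x : Char) (rest : List Char) (acc : List (List Char)) (fuel : Nat) :
    PySem.Chars.splitOn.go sep (fuel+1) (x :: rest) cur acc =
      if sep.isPrefixOf (x :: rest) then PySem.Chars.splitOn.go sep fuel (List.drop sep.length (x :: rest)) [] (cur.reverse :: acc)
      else PySem.Chars.splitOn.go sep fuel rest (x :: cur) acc := rfl

theorem pv_splitF_unfold (c : Char) (v' cs : List Char) :
    pvSplitF c v' cs =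
      if PySem.Chars.find cs (c :: v') = -1 then [cs]
      else cs.take (PySem.Chars.find cs (c :: v')).toNat ::
        pvSplitF c v' (cs.drop ((PySem.Chars.find cs (c :: v')).toNat + (c :: v').length)) := by
  rw [pvSplitF]
  split <;> simp_all

theorem pv_splitF_ne_nil (c : Char) (v' cs : List Char) : pvSplitF c v' cs ≠ [] := by
  rw [pvSplitF]
  split <;> simp

theorem pv_splitOn_go_eq (c : Char) (v' : List Char) :
    ∀ (fuel : Nat) (l cur : List Char) (acc : List (List Char)), l.length + 1 ≤ fuel →
    PySem.Chars.splitOn.go (c :: v') fuel l cur acc =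
      acc.reverse ++ pvConsHead cur.reverse (pvSplitF c v' l) := by
  intro fuel
  induction fuel with
  | zero => intro l cur acc h; omega
  | succ fuel ih =>
    intro l cur acc h
    match l with
    | [] =>
      rw [pv_go_succ_nil, pv_splitF_unfold]
      simp [pv_find_nil (c :: v') (by simp), pvConsHead]
    | x :: rest =>
      rw [pv_go_succ_cons]
      by_cases hp : (c :: v').isPrefixOf (x :: rest) = true
      · rw [if_pos hp]
        rw [ih _ _ _ (by simp at h ⊢; omega)]
        rw [pv_splitF_unfold c v' (x :: rest)]
        rw [if_neg (by simp [pv_find_cons_pos _ _ _ hp])]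
        obtain ⟨t, ts, hT⟩ := List.exists_cons_of_ne_nil
          (pv_splitF_ne_nil c v' (List.drop v'.length rest))
        simp [pv_find_cons_pos _ _ _ hp, hT, pvConsHead]
      · rw [if_neg hp]
        rw [ih _ _ _ (by simp at h ⊢; omega)]
        rw [pv_splitF_unfold c v' (x :: rest)]
        rw [pv_find_cons_neg _ _ _ hp]
        by_cases hr : PySem.Chars.find rest (c :: v') = -1
        · rw [pv_splitF_unfold c v' rest]
          simp [hr, pvConsHead]
        · have h0 : 0 ≤ PySem.Chars.find rest (c :: v') := by
            have := PySem.Chars.neg_one_le_find rest (c :: v')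
            omega
          have htn : (1 + PySem.Chars.find rest (c :: v')).toNat
              = (PySem.Chars.find rest (c :: v')).toNat + 1 := by omega
          rw [pv_splitF_unfold c v' rest]
          have h1 : ¬ (1 + PySem.Chars.find rest (c :: v') = -1) := by omega
          simp only [h1, if_false, hr, htn]
          simp only [pvConsHead, List.take_succ_cons, List.length_cons]
          rw [show (PySem.Chars.find rest (c :: v')).toNat + 1 + (v'.length + 1)
              = ((PySem.Chars.find rest (c :: v')).toNat + (v'.length + 1)) + 1 from by omega,
            List.drop_succ_cons]
          simp

theorem pv_splitOn_eq (c : Char) (v' cs : List Char) :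
    PySem.Chars.splitOn cs (c :: v') = pvSplitF c v' cs := by
  show PySem.Chars.splitOn.go (c :: v') (cs.length + 1) cs [] [] = _
  rw [pv_splitOn_go_eq c v' (cs.length + 1) cs [] [] (by omega)]
  obtain ⟨t, ts, hT⟩ := List.exists_cons_of_ne_nil (pv_splitF_ne_nil c v' cs)
  simp [hT, pvConsHead]

theorem pv_bgo_eq (c : Char) (v' : List Char) : ∀ (rest : List Char) (chunks : List (List Char)),
    pvBgo c v' rest chunks =
      (chunks ++ pvPreR (c :: v') (pvSplitF c v' rest), pvLastR (pvSplitF c v' rest)) := by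
  have main : ∀ (n : Nat) (rest : List Char) (chunks : List (List Char)), rest.length = n →
      pvBgo c v' rest chunks =
        (chunks ++ pvPreR (c :: v') (pvSplitF c v' rest), pvLastR (pvSplitF c v' rest)) := by
    intro n
    induction n using Nat.strong_induction_on with
    | _ n ih =>
      intro rest chunks hn
      rw [pvBgo, pv_splitF_unfold]
      by_cases hf : PySem.Chars.find rest (c :: v') = -1
      · simp [hf, pvPreR, pvLastR]
      · have hinf : (c :: v') <:+: rest := (PySem.Chars.find_ne_neg_one_iff rest (c :: v')).1 hf
        have hlen : (c :: v').length ≤ rest.length := hinf.length_le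
        have h0 : 0 ≤ PySem.Chars.find rest (c :: v') := by
          have := PySem.Chars.neg_one_le_find rest (c :: v')
          omega
        simp only [hf, dif_neg, if_false, not_false_iff]
        rw [ih _ (by simp at hlen ⊢; omega) _ _ rfl]
        obtain ⟨t, ts, hT⟩ := List.exists_cons_of_ne_nil (pv_splitF_ne_nil c v'
          (rest.drop ((PySem.Chars.find rest (c :: v')).toNat + (c :: v').length)))
        rw [hT]
        have hrne : rest ≠ [] := by
          intro h; subst h; simp at hlen
        have htake : rest.take (PySem.Chars.find rest (c :: v')).toNat ≠ [] ↔
            (PySem.Chars.find rest (c :: v')).toNat ≠ 0 := by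
          simp [List.take_eq_nil_iff, hrne]
        simp only [pvPreR, pvLastR]
        rw [Prod.mk.injEq]
        refine ⟨?_, rfl⟩
        by_cases hi : (PySem.Chars.find rest (c :: v')).toNat = 0
        · simp [hi, htake]
        · have := htake.2 hi
          simp [hi, this]
  exact fun rest chunks => main rest.length rest chunks rfl

theorem pv_chunkR_eq (v : List Char) : ∀ (parts : List (List Char)), parts ≠ [] →
    pvChunkR v parts =
      pvPreR v parts ++ (if pvLastR parts ≠ [] then [pvWrapA (pvLastR parts)] else []) := by
  intro parts
  induction parts using pvLastR.induct with
  | case1 => intro h; exact absurd rfl h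
  | case2 p => intro _; simp [pvChunkR, pvPreR, pvLastR]
  | case3 p q r ih =>
    intro _
    simp only [pvChunkR, pvPreR, pvLastR]
    rw [ih (by simp)]
    simp [pvWrapA, pvWrapA, pvLimeA, pvLimeA]

theorem pv_preR_ne_nil (v : List Char) (p q : List Char) (r : List (List Char)) :
    pvPreR v (p :: q :: r) ≠ [] := by
  simp [pvPreR]

theorem pv_foldA (v : List Char) (n : Nat) :
    ∀ (ps : List (List Char)) (s0 : Int) (acc : List (List Char)), s0 + ps.length = n →
    (PySem.List.enumerate ps s0).foldl
        (fun acc ip =>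
          let acc := if ip.2 ≠ [] then acc ++ [pvWrapA ip.2] else acc
          if ip.1 < (n : Int) - 1 then acc ++ [pvLimeA v] else acc) acc
      = acc ++ pvChunkR v ps := by
  intro ps
  induction ps with
  | nil => intro s0 acc h; simp [pvChunkR]
  | cons p tl ih =>
    intro s0 acc h
    rw [PySem.List.enumerate_cons, List.foldl_cons]
    match tl with
    | [] =>
      have hs : ¬ ((s0 : Int) < (n : Int) - 1) := by simp at h; omega
      by_cases hp : p ≠ [] <;> simp [hp, hs, pvChunkR, PySem.List.enumerate_nil]
    | q :: r =>
      have hs : (s0 : Int) < (n : Int) - 1 := by simp at h; omega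
      rw [ih (s0 + 1) _ (by simp at h ⊢; omega)]
      by_cases hp : p ≠ [] <;> simp [hp, hs, pvChunkR]

-- ===== VERDICT (by name: the statement is the Claim_ definition above) =====
theorem sentence_with_lime_vocab_py_spec : Claim_equal_sentence_with_lime_vocab_py := by
  intro s vword _
  show sentence_with_lime_vocab_py s vword = sentence_with_lime_vocab_py_alt s vword
  cases hv : vword.toList with
  | nil =>
    simp [sentence_with_lime_vocab_py, sentence_with_lime_vocab_py_alt, hv, pvWrapA, pvWrapA]
  | cons c v' =>
    have hne : vword.toList ≠ [] := by rw [hv]; simp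
    simp only [sentence_with_lime_vocab_py, sentence_with_lime_vocab_py_alt, hv, hne, if_false,
      reduceCtorEq, ite_false]
    rw [pv_splitOn_eq, pv_bgo_eq]
    have hPne := pv_splitF_ne_nil c v' s.toList
    by_cases h1 : (pvSplitF c v' s.toList).length = 1
    · obtain ⟨p, hp⟩ : ∃ p, pvSplitF c v' s.toList = [p] := by
        match hPP : pvSplitF c v' s.toList, h1 with
        | [p], _ => exact ⟨p, rfl⟩
      rw [hp]
      simp [pvPreR, pvWrapA, pvWrapA, h1, hp]
    · obtain ⟨p, q, r, hpqr⟩ : ∃ p q r, pvSplitF c v' s.toList = p :: q :: r := by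
        match hPP : pvSplitF c v' s.toList, hPne, h1 with
        | p :: q :: r, _, _ => exact ⟨p, q, r, rfl⟩
        | [p], _, h1 => simp at h1
      rw [if_neg h1]
      rw [pv_foldA (c :: v') (pvSplitF c v' s.toList).length _ 0 [] (by simp)]
      rw [if_neg (by rw [hpqr, List.nil_append]; exact pv_preR_ne_nil _ p q r)]
      rw [List.nil_append, List.nil_append]
      rw [pv_chunkR_eq _ _ hPne]
      by_cases hl : pvLastR (pvSplitF c v' s.toList) = [] <;>
        simp [hl, pvWrapA, pvWrapA]
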